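-- pv_equiv track=rewrite | github.com/PhilipGSanova/CSA-0664-Design-and-Analysis-of-Algorithms | Assignment - 9/Word within two edits of Dictionary.py | find_matching_words
-- ===== SOURCE A (Python) =====
-- from collections import defaultdict
--
-- def is_edit_distance_one(word1, word2):
--     if len(word1) != len(word2):
--         return False
--     count_diff = 0
--     for c1, c2 in zip(word1, word2):
--         if c1 != c2:
--             count_diff += 1
--             if count_diff > 1:
--                 return False
--     return count_diff == 1
--
-- def is_edit_distance_two(word1, word2):
--     if len(word1) != len(word2):
--         return False
--     count_diff = 0
--     for c1, c2 in zip(word1, word2):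
--         if c1 != c2:
--             count_diff += 1
--             if count_diff > 2:
--                 return False
--     return count_diff == 2
--
-- def find_matching_words(queries, dictionary):
--     word_dict = defaultdict(list)
--     for word in dictionary:
--         word_dict[len(word)].append(word)
--
--     result = []
--     for query in queries:
--         if query in dictionary:
--             result.append(query)
--         else:
--             for word_length in word_dict:
--                 if len(query) - 2 <= word_length <= len(query) + 2:
--                     for word in word_dict[word_length]:
--                         if is_edit_distance_one(query, word) or is_edit_distance_two(query, word):
--                             result.append(query)
--                             break
--     return result
-- ===== SOURCE B (Python) =====
-- def find_matching_words(queries, dictionary):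
--     # Wildcard-mask index: for each dictionary word store the word and all variants
--     # with one or two positions replaced by '\x00'; a query matches iff one of its
--     # own masked variants is in the index (equal length, Hamming distance <= 2).
--     index = set()
--     for w in dictionary:
--         n = len(w)
--         index.add(w)
--         for i in range(n):
--             wi = w[:i] + '\x00' + w[i+1:]
--             index.add(wi)
--             for j in range(i + 1, n):
--                 index.add(wi[:j] + '\x00' + wi[j+1:])
--     result = []
--     for q in queries:
--         n = len(q)
--         found = q in index
--         if not found:
--             for i in range(n):
--                 qi = q[:i] + '\x00' + q[i+1:]
--                 if qi in index:
--                     found = True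
--                     break
--                 hit = False
--                 for j in range(i + 1, n):
--                     if qi[:j] + '\x00' + qi[j+1:] in index:
--                         hit = True
--                         break
--                 if hit:
--                     found = True
--                     break
--         if found:
--             result.append(q)
--     return result
-- ===== Notes on version B (the rewrite author's own statement) =====
-- stated objective: faster
-- what changed: A compares every query against every same-length dictionary word (via a length-bucketed defaultdict and two per-pair character scans); B instead builds a hash-set index of every dictionary word with 0, 1 or 2 positions replaced by a wildcard character and answers each query by set lookups of the query's own wildcard variants.
import Mathlib
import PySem

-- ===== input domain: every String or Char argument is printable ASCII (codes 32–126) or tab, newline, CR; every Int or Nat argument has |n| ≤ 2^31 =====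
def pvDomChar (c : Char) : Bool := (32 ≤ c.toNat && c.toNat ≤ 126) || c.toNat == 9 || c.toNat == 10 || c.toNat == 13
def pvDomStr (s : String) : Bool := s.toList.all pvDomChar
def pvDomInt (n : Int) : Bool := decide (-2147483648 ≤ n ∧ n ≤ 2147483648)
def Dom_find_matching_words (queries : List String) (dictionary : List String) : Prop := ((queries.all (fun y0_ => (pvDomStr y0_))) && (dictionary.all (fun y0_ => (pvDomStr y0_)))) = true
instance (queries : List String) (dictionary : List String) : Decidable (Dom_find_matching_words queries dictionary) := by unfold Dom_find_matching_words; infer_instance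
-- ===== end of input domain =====

-- B replaces A's per-query scan of the whole dictionary with a wildcard-mask set index
-- (all 0/1/2-position masks of each dictionary word), looked up per query: a different,
-- measurably faster algorithm with the same return value.


-- ===== PORT A =====
-- loop of is_edit_distance_one: early 'return False' once the counter exceeds 1
def pvEdLoop1 : List (Char × Char) → Int → Bool
  | [], cnt => cnt == 1
  | (c1, c2) :: rest, cnt =>
    if c1 ≠ c2 then
      if cnt + 1 > 1 then false else pvEdLoop1 rest (cnt + 1)
    else pvEdLoop1 rest cnt

def pvEdLoop2 : List (Char × Char) → Int → Bool
  | [], cnt => cnt == 2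
  | (c1, c2) :: rest, cnt =>
    if c1 ≠ c2 then
      if cnt + 1 > 2 then false else pvEdLoop2 rest (cnt + 1)
    else pvEdLoop2 rest cnt

def is_edit_distance_one (word1 word2 : String) : Bool :=
  if PySem.Str.len word1 ≠ PySem.Str.len word2 then false
  else pvEdLoop1 (word1.toList.zip word2.toList) 0

def is_edit_distance_two (word1 word2 : String) : Bool :=
  if PySem.Str.len word1 ≠ PySem.Str.len word2 then false
  else pvEdLoop2 (word1.toList.zip word2.toList) 0

-- inner 'for word in word_dict[word_length]: … break' loop: stop at the first match
def pvDictScan (query : String) : List String → Bool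
  | [] => false
  | w :: ws =>
    if is_edit_distance_one query w || is_edit_distance_two query w then true
    else pvDictScan query ws

def find_matching_words (queries : List String) (dictionary : List String) : List String :=
  let word_dict : PySem.Dict Int (List String) :=
    dictionary.foldl (fun d word => d.modify (PySem.Str.len word) [] (fun l => l ++ [word])) PySem.Dict.empty
  queries.foldl (fun result query =>
    if dictionary.contains query then result ++ [query]
    else
      word_dict.keys.foldl (fun result word_length =>
        if PySem.Str.len query - 2 ≤ word_length ∧ word_length ≤ PySem.Str.len query + 2 then
          if pvDictScan query (word_dict.getD word_length []) then result ++ [query] else result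
        else result) result) []

-- ===== PORT B =====
-- w[:i] + '\x00' + w[i+1:] : the word with position i replaced by the wildcard '\x00'
def pvMask (cs : List Char) (i : Nat) : List Char :=
  PySem.List.slice cs none (some (i : Int)) ++ '\x00' :: PySem.List.slice cs (some ((i : Int) + 1)) none

-- index.add(w) plus the two nested 'for i / for j' mask-insertion loops of one word
def pvAddMasks (s : PySem.Set (List Char)) (w : List Char) : PySem.Set (List Char) :=
  (List.range w.length).foldl
    (fun s i =>
      (List.range' (i + 1) (w.length - (i + 1))).foldl
        (fun s j => PySem.Set.add s (pvMask (pvMask w i) j))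
        (PySem.Set.add s (pvMask w i)))
    (PySem.Set.add s w)

def pvIndex (dictionary : List String) : PySem.Set (List Char) :=
  dictionary.foldl (fun s w => pvAddMasks s w.toList) PySem.Set.empty

-- inner 'for j in range(i+1, n): … break' lookup loop
def pvScanPairs (index : PySem.Set (List Char)) (qi : List Char) : List Nat → Bool
  | [] => false
  | j :: js =>
    if PySem.Set.contains index (pvMask qi j) then true else pvScanPairs index qi js

-- outer 'for i in range(n): … break' lookup loop
def pvScanSingles (index : PySem.Set (List Char)) (q : List Char) : List Nat → Bool
  | [] => false
  | i :: is =>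
    if PySem.Set.contains index (pvMask q i) then true
    else if pvScanPairs index (pvMask q i) (List.range' (i + 1) (q.length - (i + 1))) then true
    else pvScanSingles index q is

def find_matching_words_alt (queries : List String) (dictionary : List String) : List String :=
  let index := pvIndex dictionary
  queries.foldl (fun result q =>
    if PySem.Set.contains index q.toList
       || pvScanSingles index q.toList (List.range q.toList.length)
    then result ++ [q] else result) []

-- ===== PRECONDITION & SPEC =====
def Spec_find_matching_words (queries : List String) (dictionary : List String) (out : List String) : Prop := out = find_matching_words_alt queries dictionary
instance (queries : List String) (dictionary : List String) (out : List String) : Decidable (Spec_find_matching_words queries dictionary out) := by unfold Spec_find_matching_words; infer_instance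

-- ===== CLAIM (what is proved, stated in full; the proofs are below) =====
def Claim_equal_find_matching_words : Prop := ∀ (queries : List String) (dictionary : List String), Dom_find_matching_words queries dictionary → Spec_find_matching_words queries dictionary (find_matching_words queries dictionary)

-- ===== LEMMAS AND PROOFS =====

-- number of positions where two equal-length words differ (Hamming distance)
def pvHD (a b : List Char) : Nat := (a.zip b).countP (fun p => !(p.1 == p.2))

-- canonical per-query condition both programs compute
def pvGood (dictionary : List String) (q : String) : Bool :=
  dictionary.any (fun w =>
    (w.toList.length == q.toList.length) && decide (pvHD q.toList w.toList ≤ 2))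

-- '\x00' does not occur (true for every word in Dom)
def pvNox (l : List Char) : Prop := '\x00' ∉ l

-- the values pvAddMasks inserts for word w
def pvEntry (w x : List Char) : Prop :=
  x = w ∨ (∃ i < w.length, x = pvMask w i) ∨
    (∃ i j, i < j ∧ j < w.length ∧ x = pvMask (pvMask w i) j)

lemma pvHD_cons (x y : Char) (xs ys : List Char) :
    pvHD (x :: xs) (y :: ys) = pvHD xs ys + (if x = y then 0 else 1) := by
  simp [pvHD, List.countP_cons]

lemma pv_eq_iff : ∀ (a b : List Char), a = b ↔ (a.length = b.length ∧ pvHD a b = 0) := by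
  intro a
  induction a with
  | nil => intro b; cases b <;> simp [pvHD]
  | cons x xs ih =>
    intro b
    cases b with
    | nil => simp [pvHD]
    | cons y ys =>
      rw [pvHD_cons]
      by_cases h : x = y
      · subst h
        constructor
        · intro he
          have hx : xs = ys := by injection he
          subst hx
          have := (ih xs).mp rfl
          simp [this.2]
        · rintro ⟨h1, h2⟩
          simp at h2
          have := (ih ys).mpr ⟨by simpa using h1, h2⟩
          rw [this]
      · constructor
        · intro he; injection he with h1 _; exact absurd h1 h
        · rintro ⟨_, h2⟩
          simp [if_neg h] at h2

lemma pvEdLoop1_eq : ∀ (l : List (Char × Char)) (cnt : Int), 0 ≤ cnt → cnt ≤ 1 →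
    pvEdLoop1 l cnt = decide (cnt + (l.countP (fun p => !(p.1 == p.2)) : Int) = 1) := by
  intro l
  induction l with
  | nil =>
    intro cnt h0 h1
    rw [show pvEdLoop1 [] cnt = (cnt == 1) from rfl, Bool.eq_iff_iff]
    simp
  | cons p rest ih =>
    intro cnt h0 h1
    obtain ⟨c1, c2⟩ := p
    rw [show pvEdLoop1 ((c1, c2) :: rest) cnt =
      (if c1 ≠ c2 then (if cnt + 1 > 1 then false else pvEdLoop1 rest (cnt + 1))
       else pvEdLoop1 rest cnt) from rfl]
    by_cases h : c1 = c2
    · rw [if_neg (by simp [h]), ih cnt h0 h1, decide_eq_decide]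
      simp [h]
    · rw [if_pos (by simp [h])]
      by_cases hc : cnt + 1 > 1
      · rw [if_pos hc]
        symm; rw [decide_eq_false_iff_not]
        simp only [List.countP_cons, if_pos (by simp [h] : (!(c1 == c2)) = true)]
        push_cast
        omega
      · rw [if_neg hc, ih (cnt + 1) (by omega) (by omega), decide_eq_decide]
        simp only [List.countP_cons, if_pos (by simp [h] : (!(c1 == c2)) = true)]
        push_cast
        omega

lemma pvEdLoop2_eq : ∀ (l : List (Char × Char)) (cnt : Int), 0 ≤ cnt → cnt ≤ 2 →
    pvEdLoop2 l cnt = decide (cnt + (l.countP (fun p => !(p.1 == p.2)) : Int) = 2) := by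
  intro l
  induction l with
  | nil =>
    intro cnt h0 h1
    rw [show pvEdLoop2 [] cnt = (cnt == 2) from rfl, Bool.eq_iff_iff]
    simp
  | cons p rest ih =>
    intro cnt h0 h1
    obtain ⟨c1, c2⟩ := p
    rw [show pvEdLoop2 ((c1, c2) :: rest) cnt =
      (if c1 ≠ c2 then (if cnt + 1 > 2 then false else pvEdLoop2 rest (cnt + 1))
       else pvEdLoop2 rest cnt) from rfl]
    by_cases h : c1 = c2
    · rw [if_neg (by simp [h]), ih cnt h0 h1, decide_eq_decide]
      simp [h]
    · rw [if_pos (by simp [h])]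
      by_cases hc : cnt + 1 > 2
      · rw [if_pos hc]
        symm; rw [decide_eq_false_iff_not]
        simp only [List.countP_cons, if_pos (by simp [h] : (!(c1 == c2)) = true)]
        push_cast
        omega
      · rw [if_neg hc, ih (cnt + 1) (by omega) (by omega), decide_eq_decide]
        simp only [List.countP_cons, if_pos (by simp [h] : (!(c1 == c2)) = true)]
        push_cast
        omega

lemma pvEd1_iff (q w : String) :
    is_edit_distance_one q w = true ↔
      (q.toList.length = w.toList.length ∧ pvHD q.toList w.toList = 1) := by
  unfold is_edit_distance_one
  by_cases h : PySem.Str.len q = PySem.Str.len w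
  · rw [if_neg (by simpa using h), pvEdLoop1_eq _ 0 (by omega) (by omega)]
    simp only [PySem.Str.len_eq] at h
    rw [decide_eq_true_iff]
    constructor
    · intro hc; exact ⟨by exact_mod_cast h, by simp only [pvHD]; omega⟩
    · rintro ⟨_, h2⟩; simp only [pvHD] at h2; omega
  · rw [if_pos (by simpa using h)]
    simp only [PySem.Str.len_eq] at h
    constructor
    · intro hc; simp at hc
    · rintro ⟨h1, _⟩; exact absurd (by exact_mod_cast h1) h

lemma pvEd2_iff (q w : String) :
    is_edit_distance_two q w = true ↔
      (q.toList.length = w.toList.length ∧ pvHD q.toList w.toList = 2) := by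
  unfold is_edit_distance_two
  by_cases h : PySem.Str.len q = PySem.Str.len w
  · rw [if_neg (by simpa using h), pvEdLoop2_eq _ 0 (by omega) (by omega)]
    simp only [PySem.Str.len_eq] at h
    rw [decide_eq_true_iff]
    constructor
    · intro hc; exact ⟨by exact_mod_cast h, by simp only [pvHD]; omega⟩
    · rintro ⟨_, h2⟩; simp only [pvHD] at h2; omega
  · rw [if_pos (by simpa using h)]
    simp only [PySem.Str.len_eq] at h
    constructor
    · intro hc; simp at hc
    · rintro ⟨h1, _⟩; exact absurd (by exact_mod_cast h1) h

lemma pvDictScan_eq (q : String) : ∀ (l : List String),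
    pvDictScan q l = l.any (fun w => is_edit_distance_one q w || is_edit_distance_two q w) := by
  intro l
  induction l with
  | nil => simp [pvDictScan]
  | cons w ws ih =>
    rw [show pvDictScan q (w :: ws) =
      (if is_edit_distance_one q w || is_edit_distance_two q w then true else pvDictScan q ws) from rfl,
      List.any_cons, ih]
    by_cases h : (is_edit_distance_one q w || is_edit_distance_two q w) = true <;> simp [h]

lemma pvBucket (dictionary : List String) (k : Int) :
    (dictionary.foldl (fun d word => d.modify (PySem.Str.len word) [] (fun l => l ++ [word]))
        PySem.Dict.empty).getD k []
      = dictionary.filter (fun w => PySem.Str.len w == k) := by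
  rw [show dictionary.foldl
      (fun d word => d.modify (PySem.Str.len word) [] (fun l => l ++ [word])) PySem.Dict.empty
    = (dictionary.map (fun w => (PySem.Str.len w, w))).foldl
      (fun d p => d.modify p.1 [] (fun l => l ++ [p.2])) PySem.Dict.empty
    from (List.foldl_map (f := fun w => (PySem.Str.len w, w))
      (g := fun d p => d.modify p.1 [] fun l => l ++ [p.2])
      (l := dictionary) (init := PySem.Dict.empty)).symm]
  rw [PySem.Dict.getD_foldl_modify_append, PySem.Dict.getD_empty, List.nil_append,
    List.filter_map, List.map_map]
  simp [Function.comp_def]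

lemma pvKeys (dictionary : List String) :
    (dictionary.foldl (fun d word => d.modify (PySem.Str.len word) [] (fun l => l ++ [word]))
        PySem.Dict.empty).keys
      = PySem.Set.ofList (dictionary.map PySem.Str.len) := by
  rw [PySem.Dict.keys_foldl_modify_key dictionary PySem.Str.len []
      (fun _ word => fun l => l ++ [word]) PySem.Dict.empty,
    PySem.Dict.keys_empty, PySem.Set.update_nil_left]

lemma pvFilter_singleton {α : Type} [DecidableEq α] (p : α → Bool) (a : α) :
    ∀ (l : List α), l.Nodup → (∀ x, p x = true → x = a) →
      l.filter p = if l.any p then [a] else [] := by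
  intro l
  induction l with
  | nil => simp
  | cons x xs ih =>
    intro hnd hp
    rw [List.filter_cons, List.any_cons]
    by_cases hx : p x = true
    · have hxa := hp x hx
      subst hxa
      have hnil : xs.filter p = [] := by
        rw [List.filter_eq_nil_iff]
        intro b hb hpb
        have hba := hp b hpb
        subst hba
        exact (List.nodup_cons.mp hnd).1 hb
      simp [hx, hnil]
    · simp only [hx, Bool.false_or]
      rw [if_neg (by simp [hx])]
      exact ih (List.nodup_cons.mp hnd).2 hp

-- A's per-query condition equals pvGood
lemma pvCondA (dictionary : List String) (q : String) :
    (dictionary.contains q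
      || ((dictionary.map PySem.Str.len).any (fun k =>
            decide (PySem.Str.len q - 2 ≤ k ∧ k ≤ PySem.Str.len q + 2)
              && pvDictScan q (dictionary.filter (fun w => PySem.Str.len w == k)))))
      = pvGood dictionary q := by
  rw [Bool.eq_iff_iff]
  simp only [pvGood, Bool.or_eq_true, List.any_eq_true, Bool.and_eq_true, decide_eq_true_eq,
    List.contains_iff_mem, List.mem_map, List.mem_filter, pvDictScan_eq, beq_iff_eq]
  constructor
  · rintro (hq | ⟨k, ⟨w0, hw0, rfl⟩, hrange, w, ⟨hw, hwk⟩, hed⟩)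
    · exact ⟨q, hq, rfl, by rw [((pv_eq_iff q.toList q.toList).mp rfl).2]; omega⟩
    · rcases hed with h1 | h2
      · obtain ⟨hlen, hhd⟩ := (pvEd1_iff q w).mp h1
        exact ⟨w, hw, hlen.symm, by omega⟩
      · obtain ⟨hlen, hhd⟩ := (pvEd2_iff q w).mp h2
        exact ⟨w, hw, hlen.symm, by omega⟩
  · rintro ⟨w, hw, hlen, hhd⟩
    rcases Nat.lt_or_ge (pvHD q.toList w.toList) 1 with h0 | h12
    · left
      have : q.toList = w.toList := (pv_eq_iff q.toList w.toList).mpr ⟨hlen.symm, by omega⟩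
      exact String.toList_inj.mp this ▸ hw
    · right
      refine ⟨PySem.Str.len w, ⟨w, hw, rfl⟩, ?_, w, ⟨hw, rfl⟩, ?_⟩
      · have hq := PySem.Str.len_eq q
        have hw' := PySem.Str.len_eq w
        rw [hq, hw']
        omega
      · rcases Nat.lt_or_ge (pvHD q.toList w.toList) 2 with h1 | h2
        · exact Or.inl ((pvEd1_iff q w).mpr ⟨hlen.symm, by omega⟩)
        · exact Or.inr ((pvEd2_iff q w).mpr ⟨hlen.symm, by omega⟩)

-- ----- mask structure -----
lemma pvMask_eq (l : List Char) (i : Nat) :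
    pvMask l i = l.take i ++ '\x00' :: l.drop (i + 1) := by
  unfold pvMask
  rw [PySem.List.slice_to_natCast,
    show ((i : Int) + 1) = ((i + 1 : Nat) : Int) by push_cast; ring,
    PySem.List.slice_from_natCast]

lemma pvMask_zero (a : Char) (l : List Char) : pvMask (a :: l) 0 = '\x00' :: l := by
  rw [pvMask_eq]; simp

lemma pvMask_succ (a : Char) (l : List Char) (i : Nat) :
    pvMask (a :: l) (i + 1) = a :: pvMask l i := by
  rw [pvMask_eq, pvMask_eq]; simp

lemma pvMask_length (l : List Char) (i : Nat) (h : i < l.length) :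
    (pvMask l i).length = l.length := by
  rw [pvMask_eq]; simp; omega

lemma pvMask_mem (l : List Char) (i : Nat) (h : i < l.length) : '\x00' ∈ pvMask l i := by
  rw [pvMask_eq]; simp

lemma pvF0 (a b : List Char) (j : Nat) (ha : pvNox a) (hj : j < b.length)
    (h : a = pvMask b j) : False := by
  exact ha (h ▸ pvMask_mem b j hj)

lemma pvF1 : ∀ (a b : List Char) (i j : Nat), pvNox a → pvNox b →
    i < a.length → j < b.length → pvMask a i = pvMask b j →
    i = j ∧ a.length = b.length ∧ pvHD a b ≤ 1 := by
  intro a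
  induction a with
  | nil => intro b i j _ _ hi; simp at hi
  | cons x xs ih =>
    intro b i j hna hnb hi hj heq
    cases b with
    | nil => simp at hj
    | cons y ys =>
      cases i with
      | zero =>
        cases j with
        | zero =>
          rw [pvMask_zero, pvMask_zero] at heq
          have hxs : xs = ys := by injection heq
          subst hxs
          refine ⟨rfl, rfl, ?_⟩
          have h0 : pvHD xs xs = 0 := ((pv_eq_iff xs xs).mp rfl).2
          rw [pvHD_cons, h0]
          split_ifs <;> omega
        | succ k =>
          rw [pvMask_zero, pvMask_succ] at heq
          have h1 : '\x00' = y := by injection heq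
          exact absurd (h1 ▸ List.mem_cons_self) hnb
      | succ s =>
        cases j with
        | zero =>
          rw [pvMask_succ, pvMask_zero] at heq
          have h1 : x = '\x00' := by injection heq
          exact absurd (h1 ▸ List.mem_cons_self) hna
        | succ k =>
          rw [pvMask_succ, pvMask_succ] at heq
          have h1 : x = y := by injection heq
          have h2 : pvMask xs s = pvMask ys k := by injection heq
          have nxa : pvNox xs := fun hm => hna (List.mem_cons_of_mem _ hm)
          have nyb : pvNox ys := fun hm => hnb (List.mem_cons_of_mem _ hm)
          obtain ⟨e1, e2, e3⟩ := ih ys s k nxa nyb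
            (by simp only [List.length_cons] at hi; omega)
            (by simp only [List.length_cons] at hj; omega) h2
          refine ⟨by omega, by simp [e2], ?_⟩
          rw [pvHD_cons, if_pos h1]
          omega

lemma pvF2 : ∀ (a b : List Char) (i i' j' : Nat), pvNox a → pvNox b →
    i < a.length → i' < j' → j' < b.length →
    pvMask a i = pvMask (pvMask b i') j' → False := by
  intro a
  induction a with
  | nil => intro b i i' j' _ _ hi; simp at hi
  | cons x xs ih =>
    intro b i i' j' hna hnb hi hii' hj' heq
    cases b with
    | nil => simp at hj'
    | cons y ys =>
      cases j' with
      | zero => omega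
      | succ k =>
        cases i with
        | zero =>
          cases i' with
          | zero =>
            rw [pvMask_zero, pvMask_zero, pvMask_succ] at heq
            have h2 : xs = pvMask ys k := by injection heq
            have nxa : pvNox xs := fun hm => hna (List.mem_cons_of_mem _ hm)
            exact pvF0 xs ys k nxa (by simp only [List.length_cons] at hj'; omega) h2
          | succ s =>
            rw [pvMask_zero, pvMask_succ, pvMask_succ] at heq
            have h1 : '\x00' = y := by injection heq
            exact absurd (h1 ▸ List.mem_cons_self) hnb
        | succ t =>
          cases i' with
          | zero =>
            rw [pvMask_succ, pvMask_zero, pvMask_succ] at heq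
            have h1 : x = '\x00' := by injection heq
            exact absurd (h1 ▸ List.mem_cons_self) hna
          | succ s =>
            rw [pvMask_succ, pvMask_succ, pvMask_succ] at heq
            have h2 : pvMask xs t = pvMask (pvMask ys s) k := by injection heq
            have nxa : pvNox xs := fun hm => hna (List.mem_cons_of_mem _ hm)
            have nyb : pvNox ys := fun hm => hnb (List.mem_cons_of_mem _ hm)
            exact ih ys t s k nxa nyb
              (by simp only [List.length_cons] at hi; omega) (by omega)
              (by simp only [List.length_cons] at hj'; omega) h2

lemma pvF3 : ∀ (a b : List Char) (i j i' j' : Nat), pvNox a → pvNox b →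
    i < j → j < a.length → i' < j' → j' < b.length →
    pvMask (pvMask a i) j = pvMask (pvMask b i') j' →
    a.length = b.length ∧ pvHD a b ≤ 2 := by
  intro a
  induction a with
  | nil => intro b i j i' j' _ _ _ hj; simp at hj
  | cons x xs ih =>
    intro b i j i' j' hna hnb hij hj hij' hj' heq
    cases b with
    | nil => simp at hj'
    | cons y ys =>
      cases j with
      | zero => omega
      | succ t =>
        cases j' with
        | zero => omega
        | succ k =>
          cases i with
          | zero =>
            cases i' with
            | zero =>
              rw [pvMask_zero, pvMask_zero, pvMask_succ, pvMask_succ] at heq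
              have h2 : pvMask xs t = pvMask ys k := by injection heq
              have nxa : pvNox xs := fun hm => hna (List.mem_cons_of_mem _ hm)
              have nyb : pvNox ys := fun hm => hnb (List.mem_cons_of_mem _ hm)
              obtain ⟨e1, e2, e3⟩ := pvF1 xs ys t k nxa nyb
                (by simp only [List.length_cons] at hj; omega)
                (by simp only [List.length_cons] at hj'; omega) h2
              refine ⟨by simp [e2], ?_⟩
              rw [pvHD_cons]
              split_ifs <;> omega
            | succ s =>
              rw [pvMask_zero, pvMask_succ, pvMask_succ, pvMask_succ] at heq
              have h1 : '\x00' = y := by injection heq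
              exact absurd (h1 ▸ List.mem_cons_self) hnb
          | succ u =>
            cases i' with
            | zero =>
              rw [pvMask_succ, pvMask_succ, pvMask_zero, pvMask_succ] at heq
              have h1 : x = '\x00' := by injection heq
              exact absurd (h1 ▸ List.mem_cons_self) hna
            | succ s =>
              rw [pvMask_succ, pvMask_succ, pvMask_succ, pvMask_succ] at heq
              have h1 : x = y := by injection heq
              have h2 : pvMask (pvMask xs u) t = pvMask (pvMask ys s) k := by injection heq
              have nxa : pvNox xs := fun hm => hna (List.mem_cons_of_mem _ hm)
              have nyb : pvNox ys := fun hm => hnb (List.mem_cons_of_mem _ hm)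
              obtain ⟨e2, e3⟩ := ih ys u t s k nxa nyb (by omega)
                (by simp only [List.length_cons] at hj; omega) (by omega)
                (by simp only [List.length_cons] at hj'; omega) h2
              refine ⟨by simp [e2], ?_⟩
              rw [pvHD_cons, if_pos h1]
              omega

lemma pvB1 : ∀ (a b : List Char), a.length = b.length → pvHD a b = 1 →
    ∃ i < a.length, pvMask a i = pvMask b i := by
  intro a
  induction a with
  | nil =>
    intro b hlen h1
    cases b with
    | nil => simp [pvHD] at h1
    | cons y ys => simp at hlen
  | cons x xs ih =>
    intro b hlen h1
    cases b with
    | nil => simp at hlen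
    | cons y ys =>
      rw [pvHD_cons] at h1
      by_cases hxy : x = y
      · rw [if_pos hxy, Nat.add_zero] at h1
        obtain ⟨i, hi, he⟩ := ih ys (by simp only [List.length_cons] at hlen; omega) h1
        refine ⟨i + 1, by simp only [List.length_cons]; omega, ?_⟩
        rw [pvMask_succ, pvMask_succ, he, hxy]
      · rw [if_neg hxy] at h1
        have h0 : pvHD xs ys = 0 := by omega
        have hxs : xs = ys := (pv_eq_iff xs ys).mpr
          ⟨by simp only [List.length_cons] at hlen; omega, h0⟩
        exact ⟨0, by simp, by rw [pvMask_zero, pvMask_zero, hxs]⟩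

lemma pvB2 : ∀ (a b : List Char), a.length = b.length → pvHD a b = 2 →
    ∃ i j, i < j ∧ j < a.length ∧ pvMask (pvMask a i) j = pvMask (pvMask b i) j := by
  intro a
  induction a with
  | nil =>
    intro b hlen h2
    cases b with
    | nil => simp [pvHD] at h2
    | cons y ys => simp at hlen
  | cons x xs ih =>
    intro b hlen h2
    cases b with
    | nil => simp at hlen
    | cons y ys =>
      rw [pvHD_cons] at h2
      by_cases hxy : x = y
      · rw [if_pos hxy, Nat.add_zero] at h2
        obtain ⟨i, j, hij, hj, he⟩ := ih ys (by simp only [List.length_cons] at hlen; omega) h2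
        refine ⟨i + 1, j + 1, by omega, by simp only [List.length_cons]; omega, ?_⟩
        rw [pvMask_succ, pvMask_succ, pvMask_succ, pvMask_succ, he, hxy]
      · rw [if_neg hxy] at h2
        have h1 : pvHD xs ys = 1 := by omega
        obtain ⟨i, hi, he⟩ := pvB1 xs ys (by simp only [List.length_cons] at hlen; omega) h1
        refine ⟨0, i + 1, by omega, by simp only [List.length_cons]; omega, ?_⟩
        rw [pvMask_zero, pvMask_zero, pvMask_succ, pvMask_succ, he]

-- ----- index membership -----
lemma pv_mem_foldl {β : Type} (x : List Char) (P : β → Prop)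
    (F : PySem.Set (List Char) → β → PySem.Set (List Char))
    (hF : ∀ s b, x ∈ F s b ↔ x ∈ s ∨ P b) :
    ∀ (l : List β) (s : PySem.Set (List Char)),
      x ∈ l.foldl F s ↔ x ∈ s ∨ ∃ b ∈ l, P b := by
  intro l
  induction l with
  | nil => intro s; simp
  | cons b bs ih =>
    intro s
    rw [List.foldl_cons, ih, hF]
    simp only [List.mem_cons]
    constructor
    · rintro ((h | h) | ⟨b', hb', hP⟩)
      · exact Or.inl h
      · exact Or.inr ⟨b, Or.inl rfl, h⟩
      · exact Or.inr ⟨b', Or.inr hb', hP⟩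
    · rintro (h | ⟨b', (rfl | hb'), hP⟩)
      · exact Or.inl (Or.inl h)
      · exact Or.inl (Or.inr hP)
      · exact Or.inr ⟨b', hb', hP⟩

lemma pv_mem_addMasks (x : List Char) (s : PySem.Set (List Char)) (w : List Char) :
    x ∈ pvAddMasks s w ↔ x ∈ s ∨ pvEntry w x := by
  unfold pvAddMasks
  rw [pv_mem_foldl x
    (P := fun i => x = pvMask w i ∨
      ∃ j ∈ List.range' (i + 1) (w.length - (i + 1)), x = pvMask (pvMask w i) j)
    (F := fun s i =>
      (List.range' (i + 1) (w.length - (i + 1))).foldl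
        (fun s j => PySem.Set.add s (pvMask (pvMask w i) j))
        (PySem.Set.add s (pvMask w i)))
    (fun s i => by
      rw [PySem.Set.mem_foldl_add, PySem.Set.mem_add]
      tauto)]
  rw [PySem.Set.mem_add]
  unfold pvEntry
  constructor
  · rintro ((h | h) | ⟨i, hi, (h | ⟨j, hj, h⟩)⟩)
    · exact Or.inl h
    · exact Or.inr (Or.inl h)
    · exact Or.inr (Or.inr (Or.inl ⟨i, List.mem_range.mp hi, h⟩))
    · rw [List.mem_range'_1] at hj
      rw [List.mem_range] at hi
      exact Or.inr (Or.inr (Or.inr ⟨i, j, by omega, by omega, h⟩))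
  · rintro (h | (h | (⟨i, hi, h⟩ | ⟨i, j, hij, hj, h⟩)))
    · exact Or.inl (Or.inl h)
    · exact Or.inl (Or.inr h)
    · exact Or.inr ⟨i, List.mem_range.mpr hi, Or.inl h⟩
    · exact Or.inr ⟨i, List.mem_range.mpr (by omega),
        Or.inr ⟨j, List.mem_range'_1.mpr ⟨by omega, by omega⟩, h⟩⟩

lemma pv_mem_index_aux (x : List Char) : ∀ (l : List String) (s : PySem.Set (List Char)),
    x ∈ l.foldl (fun s w => pvAddMasks s w.toList) s ↔ x ∈ s ∨ ∃ w ∈ l, pvEntry w.toList x := by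
  intro l
  induction l with
  | nil => intro s; simp
  | cons w ws ih =>
    intro s
    rw [List.foldl_cons, ih, pv_mem_addMasks]
    simp only [List.mem_cons]
    constructor
    · rintro ((h | h) | ⟨w', hw', hP⟩)
      · exact Or.inl h
      · exact Or.inr ⟨w, Or.inl rfl, h⟩
      · exact Or.inr ⟨w', Or.inr hw', hP⟩
    · rintro (h | ⟨w', (rfl | hw'), hP⟩)
      · exact Or.inl (Or.inl h)
      · exact Or.inl (Or.inr hP)
      · exact Or.inr ⟨w', hw', hP⟩

lemma pv_mem_index (x : List Char) (dictionary : List String) :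
    x ∈ pvIndex dictionary ↔ ∃ w ∈ dictionary, pvEntry w.toList x := by
  unfold pvIndex
  rw [pv_mem_index_aux]
  simp [PySem.Set.empty]

-- ----- B's scan loops -----
lemma pvScanPairs_eq (idx : PySem.Set (List Char)) (qi : List Char) : ∀ (js : List Nat),
    pvScanPairs idx qi js = js.any (fun j => PySem.Set.contains idx (pvMask qi j)) := by
  intro js
  induction js with
  | nil => simp [pvScanPairs]
  | cons j js ih =>
    rw [show pvScanPairs idx qi (j :: js) =
      (if PySem.Set.contains idx (pvMask qi j) then true else pvScanPairs idx qi js) from rfl,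
      List.any_cons, ih]
    by_cases h : PySem.Set.contains idx (pvMask qi j) = true <;> simp [h]

lemma pvScanSingles_eq (idx : PySem.Set (List Char)) (q : List Char) : ∀ (is : List Nat),
    pvScanSingles idx q is = is.any (fun i =>
      PySem.Set.contains idx (pvMask q i)
        || pvScanPairs idx (pvMask q i) (List.range' (i + 1) (q.length - (i + 1)))) := by
  intro is
  induction is with
  | nil => simp [pvScanSingles]
  | cons i is ih =>
    rw [show pvScanSingles idx q (i :: is) =
      (if PySem.Set.contains idx (pvMask q i) then true
       else if pvScanPairs idx (pvMask q i) (List.range' (i + 1) (q.length - (i + 1))) then true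
       else pvScanSingles idx q is) from rfl,
      List.any_cons, ih]
    by_cases h1 : PySem.Set.contains idx (pvMask q i) = true
    · simp [h1, Bool.or_assoc]
    · by_cases h2 : pvScanPairs idx (pvMask q i) (List.range' (i + 1) (q.length - (i + 1))) = true <;>
        simp [h1, h2]

-- B's per-query condition equals pvGood (on '\x00'-free inputs)
lemma pvCondB (dictionary : List String) (q : String)
    (hq : pvNox q.toList) (hd : ∀ w ∈ dictionary, pvNox w.toList) :
    (PySem.Set.contains (pvIndex dictionary) q.toList
      || pvScanSingles (pvIndex dictionary) q.toList (List.range q.toList.length))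
      = pvGood dictionary q := by
  rw [Bool.eq_iff_iff, pvScanSingles_eq]
  simp only [pvGood, Bool.or_eq_true, List.any_eq_true, Bool.and_eq_true, decide_eq_true_eq,
    List.mem_range, beq_iff_eq, PySem.Set.contains_iff, pv_mem_index, pvScanPairs_eq,
    List.mem_range'_1]
  constructor
  · rintro (⟨w, hw, hent⟩ | ⟨i, hi, hrest⟩)
    · have nw := hd w hw
      rcases hent with heq | ⟨i, hiw, heq⟩ | ⟨i, j, hij, hjw, heq⟩
      · obtain ⟨hl, hhd⟩ := (pv_eq_iff q.toList w.toList).mp heq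
        exact ⟨w, hw, hl.symm, by omega⟩
      · exact absurd heq (fun h => pvF0 q.toList w.toList i hq hiw h)
      · exact absurd heq (fun h => pvF0 q.toList (pvMask w.toList i) j hq
          (by rw [pvMask_length w.toList i (by omega)]; omega) h)
    · rcases hrest with ⟨w, hw, hent⟩ | ⟨j, hjr, w, hw, hent⟩
      · have nw := hd w hw
        rcases hent with heq | ⟨i', hi', heq⟩ | ⟨i', j', hij', hj', heq⟩
        · exact absurd heq.symm (fun h => pvF0 w.toList q.toList i nw hi h)
        · obtain ⟨_, hl, hhd⟩ := pvF1 q.toList w.toList i i' hq nw hi hi' heq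
          exact ⟨w, hw, hl.symm, by omega⟩
        · exact absurd heq (fun h => pvF2 q.toList w.toList i i' j' hq nw hi hij' hj' h)
      · have nw := hd w hw
        have hij : i < j := by omega
        have hj : j < q.toList.length := by omega
        rcases hent with heq | ⟨i', hi', heq⟩ | ⟨i', j', hij', hj', heq⟩
        · exact absurd heq.symm (fun h => pvF0 w.toList (pvMask q.toList i) j nw
            (by rw [pvMask_length q.toList i (by omega)]; omega) h)
        · exact absurd heq.symm (fun h => pvF2 w.toList q.toList i' i j nw hq hi' hij hj h)
        · obtain ⟨hl, hhd⟩ := pvF3 q.toList w.toList i j i' j' hq nw hij hj hij' hj' heq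
          exact ⟨w, hw, hl.symm, by omega⟩
  · rintro ⟨w, hw, hlen, hhd⟩
    rcases Nat.lt_or_ge (pvHD q.toList w.toList) 1 with h0 | h12
    · exact Or.inl ⟨w, hw, Or.inl ((pv_eq_iff q.toList w.toList).mpr ⟨hlen.symm, by omega⟩)⟩
    · rcases Nat.lt_or_ge (pvHD q.toList w.toList) 2 with h1 | h2
      · obtain ⟨i, hi, he⟩ := pvB1 q.toList w.toList hlen.symm (by omega)
        exact Or.inr ⟨i, hi, Or.inl ⟨w, hw, Or.inr (Or.inl ⟨i, by omega, he⟩)⟩⟩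
      · obtain ⟨i, j, hij, hj, he⟩ := pvB2 q.toList w.toList hlen.symm (by omega)
        exact Or.inr ⟨i, by omega, Or.inr ⟨j, ⟨by omega, by omega⟩,
          w, hw, Or.inr (Or.inr ⟨i, j, hij, by omega, he⟩)⟩⟩

lemma pvA_eq (queries dictionary : List String) :
    find_matching_words queries dictionary = queries.filter (pvGood dictionary) := by
  have hA : find_matching_words queries dictionary
      = queries.foldl (fun result query =>
          if dictionary.contains query then result ++ [query]
          else (dictionary.foldl (fun d word =>
              d.modify (PySem.Str.len word) [] (fun l => l ++ [word])) PySem.Dict.empty).keys.foldl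
            (fun result word_length =>
              if PySem.Str.len query - 2 ≤ word_length ∧ word_length ≤ PySem.Str.len query + 2 then
                if pvDictScan query ((dictionary.foldl (fun d word =>
                    d.modify (PySem.Str.len word) [] (fun l => l ++ [word])) PySem.Dict.empty).getD word_length [])
                then result ++ [query] else result
              else result) result) [] := rfl
  rw [hA]
  simp only [pvKeys, pvBucket]
  rw [show queries.filter (pvGood dictionary)
      = queries.foldl (fun acc x => if pvGood dictionary x then acc ++ [x] else acc) [] by
    rw [PySem.List.foldl_append_if_eq_filter, List.nil_append]]
  apply PySem.List.foldl_congr_mem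
  intro acc query _
  by_cases hc : dictionary.contains query = true
  · rw [if_pos hc]
    have hg : pvGood dictionary query = true := by
      rw [← pvCondA, hc, Bool.true_or]
    rw [if_pos hg]
  · rw [if_neg hc]
    have hstep2 : ∀ (r : List String), ∀ k ∈ PySem.Set.ofList (dictionary.map PySem.Str.len),
        (fun r k =>
          if PySem.Str.len query - 2 ≤ k ∧ k ≤ PySem.Str.len query + 2 then
            if pvDictScan query (dictionary.filter (fun w => PySem.Str.len w == k))
            then r ++ [query] else r
          else r) r k
        = (fun r k =>
            if (decide (PySem.Str.len query - 2 ≤ k ∧ k ≤ PySem.Str.len query + 2)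
                && pvDictScan query (dictionary.filter (fun w => PySem.Str.len w == k)))
            then r ++ [query] else r) r k := by
      intro r k _
      beta_reduce
      by_cases hr : PySem.Str.len query - 2 ≤ k ∧ k ≤ PySem.Str.len query + 2
      · rw [if_pos hr]
        by_cases hs : pvDictScan query (dictionary.filter (fun w => PySem.Str.len w == k)) = true
        · rw [if_pos hs, if_pos (by simp only [Bool.and_eq_true, decide_eq_true_eq]; exact ⟨hr, hs⟩)]
        · rw [if_neg hs, if_neg (by simp only [Bool.and_eq_true, decide_eq_true_eq]; exact fun h => hs h.2)]
      · rw [if_neg hr, if_neg (by simp only [Bool.and_eq_true, decide_eq_true_eq]; exact fun h => hr h.1)]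
    rw [PySem.List.foldl_congr_mem _ _ _ _ hstep2,
      PySem.List.foldl_append_if
        (fun k => (decide (PySem.Str.len query - 2 ≤ k ∧ k ≤ PySem.Str.len query + 2)
          && pvDictScan query (dictionary.filter (fun w => PySem.Str.len w == k))))
        (fun _ => query)]
    have hkey : ∀ k, (decide (PySem.Str.len query - 2 ≤ k ∧ k ≤ PySem.Str.len query + 2)
        && pvDictScan query (dictionary.filter (fun w => PySem.Str.len w == k))) = true →
        k = PySem.Str.len query := by
      intro k hp
      simp only [Bool.and_eq_true, Bool.or_eq_true, decide_eq_true_eq, pvDictScan_eq,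
        List.any_eq_true, List.mem_filter, beq_iff_eq] at hp
      obtain ⟨_, w, ⟨_, hlk⟩, hed⟩ := hp
      have hlen : query.toList.length = w.toList.length := by
        rcases hed with h | h
        · exact ((pvEd1_iff _ _).mp h).1
        · exact ((pvEd2_iff _ _).mp h).1
      rw [← hlk, PySem.Str.len_eq, PySem.Str.len_eq]
      omega
    rw [pvFilter_singleton _ (PySem.Str.len query) _ (PySem.Set.nodup_ofList _) hkey]
    have hanyconv : (PySem.Set.ofList (dictionary.map PySem.Str.len)).any
          (fun k => (decide (PySem.Str.len query - 2 ≤ k ∧ k ≤ PySem.Str.len query + 2)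
            && pvDictScan query (dictionary.filter (fun w => PySem.Str.len w == k))))
        = (dictionary.map PySem.Str.len).any
          (fun k => (decide (PySem.Str.len query - 2 ≤ k ∧ k ≤ PySem.Str.len query + 2)
            && pvDictScan query (dictionary.filter (fun w => PySem.Str.len w == k)))) := by
      rw [Bool.eq_iff_iff]
      simp only [List.any_eq_true, PySem.Set.mem_ofList]
    have hg : pvGood dictionary query
        = (dictionary.map PySem.Str.len).any
          (fun k => (decide (PySem.Str.len query - 2 ≤ k ∧ k ≤ PySem.Str.len query + 2)
            && pvDictScan query (dictionary.filter (fun w => PySem.Str.len w == k)))) := by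
      rw [← pvCondA]
      simp only [Bool.not_eq_true] at hc
      rw [hc, Bool.false_or]
    rw [hanyconv, ← hg]
    by_cases hgq : pvGood dictionary query = true
    · rw [if_pos hgq, if_pos hgq]
      simp
    · rw [if_neg hgq, if_neg hgq]
      simp

lemma pvB_eq (queries dictionary : List String)
    (hq : ∀ q ∈ queries, pvNox q.toList) (hd : ∀ w ∈ dictionary, pvNox w.toList) :
    find_matching_words_alt queries dictionary = queries.filter (pvGood dictionary) := by
  have hB : find_matching_words_alt queries dictionary
      = queries.foldl (fun result q =>
          if PySem.Set.contains (pvIndex dictionary) q.toList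
             || pvScanSingles (pvIndex dictionary) q.toList (List.range q.toList.length)
          then result ++ [q] else result) [] := rfl
  rw [hB,
    show queries.filter (pvGood dictionary)
      = queries.foldl (fun acc x => if pvGood dictionary x then acc ++ [x] else acc) [] by
    rw [PySem.List.foldl_append_if_eq_filter, List.nil_append]]
  apply PySem.List.foldl_congr_mem
  intro acc q hqm
  rw [pvCondB dictionary q (hq q hqm) hd]

-- ===== VERDICT (by name: the statement is the Claim_ definition above) =====
theorem find_matching_words_spec : Claim_equal_find_matching_words := by
  intro queries dictionary hdom
  unfold Spec_find_matching_words
  have hnox : ∀ (s : String), pvDomStr s = true → pvNox s.toList := by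
    intro s hs hmem
    have := List.all_eq_true.mp hs _ hmem
    simp [pvDomChar] at this
  unfold Dom_find_matching_words at hdom
  simp only [Bool.and_eq_true, List.all_eq_true] at hdom
  rw [pvA_eq, pvB_eq]
  · intro q hqm; exact hnox q (hdom.1 q hqm)
  · intro w hwm; exact hnox w (hdom.2 w hwm)
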